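-- pv_equiv track=rewrite | github.com/qiqidedashamiao/oj | 20241119/zixulie/zixulie.py | sum_of_subsequences
-- ===== SOURCE A (Python) =====
-- from typing import List
-- from collections import defaultdict
--
-- def sum_of_subsequences(nums: List[int], k: int) -> int:
--     MOD = 1000000007
--     f = defaultdict(int)
--     cnt = defaultdict(int)
--     for x in nums:
--         # x - k后: f[x - k] + x * cnt[x - k]
--         # x + k后: f[x + k] + x * cnt[x + k]
--         # x单独: x * 1
--         c = cnt[x - k] + cnt[x + k] + 1
--         f[x] = (f[x] + f[x - k] + f[x + k] + x * c) % MOD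
--         cnt[x] = (cnt[x] + c) % MOD
--     return sum(f.values()) % MOD
-- ===== SOURCE B (Python) =====
-- def sum_of_subsequences(nums, k):
--     MOD = 1000000007
--     done = []  # one (value, chain-count, weighted-sum) triple per processed position
--     for x in nums:
--         ci, fi = 1, 0
--         for (y, cj, gj) in done:
--             if y == x - k:
--                 ci, fi = ci + cj, fi + gj
--             if y == x + k:
--                 ci, fi = ci + cj, fi + gj
--         ci %= MOD
--         gi = (fi + x * ci) % MOD
--         done.append((x, ci, gi))
--     return sum(g for (_, _, g) in done) % MOD
-- ===== Notes on version B (the rewrite author's own statement) =====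
-- stated objective: alternative
-- what changed: Replaces A's single value-keyed pass over two defaultdicts (f, cnt) with a dict-free positional DP that, for each element, rescans the list of previously computed (value, chain-count, weighted-sum) triples and sums the per-position weighted sums at the end.
import Mathlib
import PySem

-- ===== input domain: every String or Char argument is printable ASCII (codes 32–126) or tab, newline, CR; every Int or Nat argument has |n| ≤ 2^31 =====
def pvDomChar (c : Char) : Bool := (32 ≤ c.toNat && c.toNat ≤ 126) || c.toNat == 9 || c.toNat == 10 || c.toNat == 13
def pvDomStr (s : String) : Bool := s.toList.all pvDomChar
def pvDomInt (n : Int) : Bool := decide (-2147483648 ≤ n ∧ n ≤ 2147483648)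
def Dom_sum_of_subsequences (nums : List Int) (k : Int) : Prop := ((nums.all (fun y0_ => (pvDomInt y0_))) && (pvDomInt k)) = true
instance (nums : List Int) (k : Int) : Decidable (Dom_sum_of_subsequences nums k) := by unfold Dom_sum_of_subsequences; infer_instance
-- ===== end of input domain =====

-- B replaces A's value-keyed defaultdict pass with a dict-free positional DP over the
-- list of previously computed (value, chain-count, weighted-sum) triples (objective: alternative; not faster).

-- ===== PORT A =====
-- defaultdict(int) read: 'd[key]' returns the stored value, inserting key ↦ 0 first when absent
def pvDGet (d : PySem.Dict Int Int) (key : Int) : Int × PySem.Dict Int Int :=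
  match d.get? key with
  | some v => (v, d)
  | none => (0, d.insert key 0)

def pvStepA (k : Int) (st : PySem.Dict Int Int × PySem.Dict Int Int) (x : Int) :
    PySem.Dict Int Int × PySem.Dict Int Int :=
  let r1 := pvDGet st.2 (x - k)       -- c = cnt[x-k] + cnt[x+k] + 1
  let r2 := pvDGet r1.2 (x + k)
  let c := r1.1 + r2.1 + 1
  let r3 := pvDGet st.1 x             -- f[x] = (f[x] + f[x-k] + f[x+k] + x*c) % MOD
  let r4 := pvDGet r3.2 (x - k)
  let r5 := pvDGet r4.2 (x + k)
  let f := r5.2.insert x (PySem.Int.mod (r3.1 + r4.1 + r5.1 + x * c) 1000000007)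
  let r6 := pvDGet r2.2 x             -- cnt[x] = (cnt[x] + c) % MOD
  (f, r6.2.insert x (PySem.Int.mod (r6.1 + c) 1000000007))

def sum_of_subsequences (nums : List Int) (k : Int) : Int :=
  let st := nums.foldl (pvStepA k) (PySem.Dict.empty, PySem.Dict.empty)
  PySem.Int.mod st.1.values.sum 1000000007

-- ===== PORT B =====
-- inner loop body: the two 'if' tests against x-k and x+k (both fire when k = 0, as in A)
def pvInner (k x : Int) (acc : Int × Int) (t : Int × Int × Int) : Int × Int :=
  let acc := if t.1 = x - k then (acc.1 + t.2.1, acc.2 + t.2.2) else acc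
  if t.1 = x + k then (acc.1 + t.2.1, acc.2 + t.2.2) else acc

def pvStepB (k : Int) (done : List (Int × Int × Int)) (x : Int) : List (Int × Int × Int) :=
  let r := done.foldl (pvInner k x) (1, 0)   -- (ci, fi) after the inner loop
  let ci := PySem.Int.mod r.1 1000000007
  let gi := PySem.Int.mod (r.2 + x * ci) 1000000007
  done ++ [(x, ci, gi)]

def sum_of_subsequences_alt (nums : List Int) (k : Int) : Int :=
  let done := nums.foldl (pvStepB k) []
  PySem.Int.mod ((done.map (fun t => t.2.2)).sum) 1000000007

-- ===== PRECONDITION & SPEC =====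
def Spec_sum_of_subsequences (nums : List Int) (k : Int) (out : Int) : Prop := out = sum_of_subsequences_alt nums k
instance (nums : List Int) (k : Int) (out : Int) : Decidable (Spec_sum_of_subsequences nums k out) := by unfold Spec_sum_of_subsequences; infer_instance

-- ===== CLAIM (what is proved, stated in full; the proofs are below) =====
def Claim_equal_sum_of_subsequences : Prop := ∀ (nums : List Int) (k : Int), Dom_sum_of_subsequences nums k → Spec_sum_of_subsequences nums k (sum_of_subsequences nums k)

-- ===== LEMMAS AND PROOFS =====

-- the modulus, and the exact (mod-free) recurrence that both programs reduce modulo it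
def pvP : Int := 1000000007

def pvCsum (st : List (Int × Int × Int)) (v : Int) : Int :=
  ((st.filter (fun t => t.1 = v)).map (fun t => t.2.1)).sum

def pvGsum (st : List (Int × Int × Int)) (v : Int) : Int :=
  ((st.filter (fun t => t.1 = v)).map (fun t => t.2.2)).sum

def pvGtot (st : List (Int × Int × Int)) : Int := (st.map (fun t => t.2.2)).sum

def pvSpecStep (k : Int) (st : List (Int × Int × Int)) (x : Int) : List (Int × Int × Int) :=
  let c := 1 + pvCsum st (x - k) + pvCsum st (x + k)
  st ++ [(x, c, pvGsum st (x - k) + pvGsum st (x + k) + x * c)]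

def pvRed (t : Int × Int × Int) : Int × Int × Int := (t.1, t.2.1 % pvP, t.2.2 % pvP)

def pvRel (st : List (Int × Int × Int)) (s : PySem.Dict Int Int × PySem.Dict Int Int) : Prop :=
  (∀ v, s.1.getD v 0 = pvGsum st v % pvP) ∧
  (∀ v, s.2.getD v 0 = pvCsum st v % pvP) ∧
  s.1.values.sum % pvP = pvGtot st % pvP ∧
  s.1.keys.Nodup

theorem pvmod_eq (a : Int) : PySem.Int.mod a 1000000007 = a % pvP := by
  unfold pvP; exact PySem.Int.mod_eq_emod_of_pos (by norm_num)

theorem pvDGet_fst (d : PySem.Dict Int Int) (key : Int) : (pvDGet d key).1 = d.getD key 0 := by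
  unfold pvDGet
  cases h : d.get? key <;> simp [h, PySem.Dict.getD_eq_get?_getD]

theorem pvDGet_getD (d : PySem.Dict Int Int) (key v : Int) :
    (pvDGet d key).2.getD v 0 = d.getD v 0 := by
  unfold pvDGet
  cases h : d.get? key with
  | some w => rfl
  | none =>
    show (d.insert key 0).getD v 0 = d.getD v 0
    rw [PySem.Dict.getD_insert]
    split_ifs with hv
    · subst hv; rw [PySem.Dict.getD_eq_get?_getD, h]; rfl
    · rfl

theorem pvDGet_valsum (d : PySem.Dict Int Int) (key : Int) :
    (pvDGet d key).2.values.sum = d.values.sum := by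
  unfold pvDGet
  cases h : d.get? key with
  | some w => rfl
  | none =>
    have hc : d.contains key = false := (PySem.Dict.get?_eq_none_iff_contains d key).mp h
    show ((d.insert key 0).values).sum = _
    simp only [PySem.Dict.values]
    rw [PySem.Dict.items_insert, if_neg (by simp [hc])]
    simp

theorem pvDGet_nodup (d : PySem.Dict Int Int) (key : Int) (h : d.keys.Nodup) :
    (pvDGet d key).2.keys.Nodup := by
  unfold pvDGet
  cases hg : d.get? key with
  | some w => exact h
  | none => exact PySem.Dict.nodup_keys_insert d key 0 h

theorem pv_subst_sum (k v : Int) :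
    ∀ (l : List (Int × Int)) (w : Int), (l.map Prod.fst).Nodup → (k, w) ∈ l →
    ((l.map (fun p => if p.1 == k then (k, v) else p)).map Prod.snd).sum
      = (l.map Prod.snd).sum + v - w := by
  intro l
  induction l with
  | nil => intro w _ h; cases h
  | cons p rest ih =>
    intro w hnd hmem
    simp only [List.map_cons, List.nodup_cons] at hnd
    by_cases hpk : p.1 = k
    · have hknr : k ∉ rest.map Prod.fst := by rw [← hpk]; exact hnd.1
      have hpw : p = (k, w) := by
        rcases List.mem_cons.mp hmem with h | h
        · exact h.symm
        · exact absurd (List.mem_map.mpr ⟨(k, w), h, rfl⟩) hknr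
      subst hpw
      have hrest : rest.map (fun q => if q.1 == k then (k, v) else q) = rest := by
        conv_rhs => rw [← List.map_id rest]
        apply List.map_congr_left
        intro q hq
        have hqk : q.1 ≠ k := fun hqk => hknr (List.mem_map.mpr ⟨q, hq, hqk⟩)
        simp [hqk]
      simp only [List.map_cons, List.sum_cons, hrest]
      rw [if_pos (by simp)]
      ring
    · have hmem' : (k, w) ∈ rest := by
        rcases List.mem_cons.mp hmem with h | h
        · exact absurd (congrArg Prod.fst h).symm hpk
        · exact h
      simp only [List.map_cons, List.sum_cons]
      rw [if_neg (by simp [hpk]), ih w hnd.2 hmem']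
      ring

theorem pv_valsum_insert (d : PySem.Dict Int Int) (k v : Int) (h : d.keys.Nodup) :
    (d.insert k v).values.sum = d.values.sum + v - d.getD k 0 := by
  by_cases hc : d.contains k = true
  · have hsome : (d.get? k).isSome := by
      rw [← PySem.Dict.contains_eq_isSome_get?]; exact hc
    obtain ⟨w, hw⟩ := Option.isSome_iff_exists.mp hsome
    have hmem : (k, w) ∈ d.items := PySem.Dict.mem_items_of_get?_eq_some d hw
    have hg : d.getD k 0 = w := by rw [PySem.Dict.getD_eq_get?_getD, hw]; rfl
    have hnd : (d.items.map Prod.fst).Nodup := h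
    simp only [PySem.Dict.values]
    rw [PySem.Dict.items_insert, if_pos hc, hg]
    exact pv_subst_sum k v d.items w hnd hmem
  · have hc' : d.contains k = false := by simpa using hc
    have hnone : d.get? k = none := (PySem.Dict.get?_eq_none_iff_contains d k).mpr hc'
    rw [PySem.Dict.getD_eq_get?_getD, hnone]
    simp only [PySem.Dict.values]
    rw [PySem.Dict.items_insert, if_neg (by simp [hc'])]
    simp

theorem pvCsum_cons (t : Int × Int × Int) (st : List (Int × Int × Int)) (v : Int) :
    pvCsum (t :: st) v = (if t.1 = v then t.2.1 else 0) + pvCsum st v := by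
  by_cases h : t.1 = v <;> simp [pvCsum, h]

theorem pvGsum_cons (t : Int × Int × Int) (st : List (Int × Int × Int)) (v : Int) :
    pvGsum (t :: st) v = (if t.1 = v then t.2.2 else 0) + pvGsum st v := by
  by_cases h : t.1 = v <;> simp [pvGsum, h]

theorem pvCsum_append (st : List (Int × Int × Int)) (x c g v : Int) :
    pvCsum (st ++ [(x, c, g)]) v = pvCsum st v + if x = v then c else 0 := by
  by_cases h : x = v <;> simp [pvCsum, List.filter_append, h]

theorem pvGsum_append (st : List (Int × Int × Int)) (x c g v : Int) :
    pvGsum (st ++ [(x, c, g)]) v = pvGsum st v + if x = v then g else 0 := by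
  by_cases h : x = v <;> simp [pvGsum, List.filter_append, h]

theorem pvGtot_append (st : List (Int × Int × Int)) (x c g : Int) :
    pvGtot (st ++ [(x, c, g)]) = pvGtot st + g := by
  simp [pvGtot]

theorem pv_summod (l : List Int) : (l.map (fun a => a % pvP)).sum % pvP = l.sum % pvP :=
  (List.sum_int_mod l pvP).symm

theorem pvCsum_red (st : List (Int × Int × Int)) (v : Int) :
    pvCsum (st.map pvRed) v % pvP = pvCsum st v % pvP := by
  induction st with
  | nil => rfl
  | cons t rest ih =>
    rw [List.map_cons, pvCsum_cons, pvCsum_cons]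
    have h1 : (pvRed t).1 = t.1 := rfl
    rw [h1]
    by_cases h : t.1 = v
    · rw [if_pos h, if_pos h]
      exact Int.ModEq.add (Int.emod_emod_of_dvd _ dvd_rfl) ih
    · rw [if_neg h, if_neg h]
      simpa using ih

theorem pvGsum_red (st : List (Int × Int × Int)) (v : Int) :
    pvGsum (st.map pvRed) v % pvP = pvGsum st v % pvP := by
  induction st with
  | nil => rfl
  | cons t rest ih =>
    rw [List.map_cons, pvGsum_cons, pvGsum_cons]
    have h1 : (pvRed t).1 = t.1 := rfl
    rw [h1]
    by_cases h : t.1 = v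
    · rw [if_pos h, if_pos h]
      exact Int.ModEq.add (Int.emod_emod_of_dvd _ dvd_rfl) ih
    · rw [if_neg h, if_neg h]
      simpa using ih

theorem pvInner_foldl (k x : Int) :
    ∀ (st : List (Int × Int × Int)) (a b : Int),
    st.foldl (pvInner k x) (a, b)
      = (a + pvCsum st (x - k) + pvCsum st (x + k), b + pvGsum st (x - k) + pvGsum st (x + k)) := by
  intro st
  induction st with
  | nil => intro a b; simp [pvCsum, pvGsum]
  | cons t rest ih =>
    intro a b
    rw [List.foldl_cons]
    have hstep : pvInner k x (a, b) t
        = (a + ((if t.1 = x - k then t.2.1 else 0) + (if t.1 = x + k then t.2.1 else 0)),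
           b + ((if t.1 = x - k then t.2.2 else 0) + (if t.1 = x + k then t.2.2 else 0))) := by
      unfold pvInner
      split_ifs with hA hB hB' <;> (simp only [Prod.mk.injEq]; refine ⟨by ring, by ring⟩)
    rw [hstep, ih, pvCsum_cons, pvCsum_cons, pvGsum_cons, pvGsum_cons]
    simp only [Prod.mk.injEq]
    refine ⟨by ring, by ring⟩

theorem pvStepB_red (k : Int) (st : List (Int × Int × Int)) (x : Int) :
    pvStepB k (st.map pvRed) x = (pvSpecStep k st x).map pvRed := by
  unfold pvStepB pvSpecStep
  rw [pvInner_foldl]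
  have hc : PySem.Int.mod (1 + pvCsum (st.map pvRed) (x - k) + pvCsum (st.map pvRed) (x + k)) 1000000007
      = (1 + pvCsum st (x - k) + pvCsum st (x + k)) % pvP := by
    rw [pvmod_eq]
    exact Int.ModEq.add (Int.ModEq.add (Int.ModEq.refl 1) (pvCsum_red st _)) (pvCsum_red st _)
  have hg : PySem.Int.mod
      (0 + pvGsum (st.map pvRed) (x - k) + pvGsum (st.map pvRed) (x + k)
        + x * ((1 + pvCsum st (x - k) + pvCsum st (x + k)) % pvP)) 1000000007
      = (pvGsum st (x - k) + pvGsum st (x + k)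
        + x * (1 + pvCsum st (x - k) + pvCsum st (x + k))) % pvP := by
    rw [pvmod_eq]
    have hz : ((0 : Int) + pvGsum (st.map pvRed) (x - k) + pvGsum (st.map pvRed) (x + k)
        + x * ((1 + pvCsum st (x - k) + pvCsum st (x + k)) % pvP))
        ≡ 0 + pvGsum st (x - k) + pvGsum st (x + k)
          + x * (1 + pvCsum st (x - k) + pvCsum st (x + k)) [ZMOD pvP] :=
      Int.ModEq.add (Int.ModEq.add (Int.ModEq.add (Int.ModEq.refl 0) (pvGsum_red st _)) (pvGsum_red st _))
        (Int.ModEq.mul_left x (Int.emod_emod_of_dvd _ dvd_rfl))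
    have heq : ((0 : Int) + pvGsum st (x - k) + pvGsum st (x + k)
          + x * (1 + pvCsum st (x - k) + pvCsum st (x + k)))
        = pvGsum st (x - k) + pvGsum st (x + k) + x * (1 + pvCsum st (x - k) + pvCsum st (x + k)) := by
      ring
    rw [← heq]
    exact hz
  simp only [List.map_append, List.map_cons, List.map_nil]
  rw [hc, hg]
  rfl

theorem pvFoldB (k : Int) (nums : List Int) :
    ∀ st : List (Int × Int × Int),
    nums.foldl (pvStepB k) (st.map pvRed) = (nums.foldl (pvSpecStep k) st).map pvRed := by
  induction nums with
  | nil => intro st; rfl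
  | cons x rest ih =>
    intro st
    rw [List.foldl_cons, List.foldl_cons, pvStepB_red, ih]

theorem pvSpecStep_eq (k : Int) (st : List (Int × Int × Int)) (x : Int) :
    pvSpecStep k st x
      = st ++ [(x, 1 + pvCsum st (x - k) + pvCsum st (x + k),
          pvGsum st (x - k) + pvGsum st (x + k)
            + x * (1 + pvCsum st (x - k) + pvCsum st (x + k)))] := rfl

theorem pvStepA_rel (k x : Int) (st : List (Int × Int × Int))
    (s : PySem.Dict Int Int × PySem.Dict Int Int) (h : pvRel st s) :
    pvRel (pvSpecStep k st x) (pvStepA k s x) := by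
  obtain ⟨h1, h2, h3, h4⟩ := h
  -- values read by A, expressed through the spec sums
  have e1 : (pvDGet s.2 (x - k)).1 = pvCsum st (x - k) % pvP := by rw [pvDGet_fst, h2]
  have e2 : (pvDGet (pvDGet s.2 (x - k)).2 (x + k)).1 = pvCsum st (x + k) % pvP := by
    rw [pvDGet_fst, pvDGet_getD, h2]
  have e3 : (pvDGet s.1 x).1 = pvGsum st x % pvP := by rw [pvDGet_fst, h1]
  have e4 : (pvDGet (pvDGet s.1 x).2 (x - k)).1 = pvGsum st (x - k) % pvP := by
    rw [pvDGet_fst, pvDGet_getD, h1]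
  have e5 : (pvDGet (pvDGet (pvDGet s.1 x).2 (x - k)).2 (x + k)).1 = pvGsum st (x + k) % pvP := by
    rw [pvDGet_fst, pvDGet_getD, pvDGet_getD, h1]
  have e6 : (pvDGet (pvDGet (pvDGet s.2 (x - k)).2 (x + k)).2 x).1 = pvCsum st x % pvP := by
    rw [pvDGet_fst, pvDGet_getD, pvDGet_getD, h2]
  have gDf : ∀ v, (pvDGet (pvDGet (pvDGet s.1 x).2 (x - k)).2 (x + k)).2.getD v 0 = s.1.getD v 0 := by
    intro v; rw [pvDGet_getD, pvDGet_getD, pvDGet_getD]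
  have gDc : ∀ v, (pvDGet (pvDGet (pvDGet s.2 (x - k)).2 (x + k)).2 x).2.getD v 0 = s.2.getD v 0 := by
    intro v; rw [pvDGet_getD, pvDGet_getD, pvDGet_getD]
  have vS : (pvDGet (pvDGet (pvDGet s.1 x).2 (x - k)).2 (x + k)).2.values.sum = s.1.values.sum := by
    rw [pvDGet_valsum, pvDGet_valsum, pvDGet_valsum]
  have nD : (pvDGet (pvDGet (pvDGet s.1 x).2 (x - k)).2 (x + k)).2.keys.Nodup :=
    pvDGet_nodup _ _ (pvDGet_nodup _ _ (pvDGet_nodup _ _ h4))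
  -- the congruence for the freshly written f-value
  have hfv : PySem.Int.mod
      ((pvDGet s.1 x).1 + (pvDGet (pvDGet s.1 x).2 (x - k)).1
        + (pvDGet (pvDGet (pvDGet s.1 x).2 (x - k)).2 (x + k)).1
        + x * ((pvDGet s.2 (x - k)).1 + (pvDGet (pvDGet s.2 (x - k)).2 (x + k)).1 + 1)) 1000000007
      = (pvGsum st x + (pvGsum st (x - k) + pvGsum st (x + k)
          + x * (1 + pvCsum st (x - k) + pvCsum st (x + k)))) % pvP := by
    rw [pvmod_eq, e1, e2, e3, e4, e5]
    have hm : ((pvGsum st x % pvP + pvGsum st (x - k) % pvP + pvGsum st (x + k) % pvP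
        + x * (pvCsum st (x - k) % pvP + pvCsum st (x + k) % pvP + 1)) : Int)
        ≡ pvGsum st x + pvGsum st (x - k) + pvGsum st (x + k)
          + x * (pvCsum st (x - k) + pvCsum st (x + k) + 1) [ZMOD pvP] :=
      Int.ModEq.add
        (Int.ModEq.add
          (Int.ModEq.add (Int.emod_emod_of_dvd _ dvd_rfl) (Int.emod_emod_of_dvd _ dvd_rfl))
          (Int.emod_emod_of_dvd _ dvd_rfl))
        (Int.ModEq.mul_left x
          (Int.ModEq.add (Int.ModEq.add (Int.emod_emod_of_dvd _ dvd_rfl) (Int.emod_emod_of_dvd _ dvd_rfl))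
            (Int.ModEq.refl 1)))
    have heq : (pvGsum st x + pvGsum st (x - k) + pvGsum st (x + k)
          + x * (pvCsum st (x - k) + pvCsum st (x + k) + 1) : Int)
        = pvGsum st x + (pvGsum st (x - k) + pvGsum st (x + k)
          + x * (1 + pvCsum st (x - k) + pvCsum st (x + k))) := by ring
    rw [← heq]
    exact hm
  -- the congruence for the freshly written cnt-value
  have hcv : PySem.Int.mod
      ((pvDGet (pvDGet (pvDGet s.2 (x - k)).2 (x + k)).2 x).1
        + ((pvDGet s.2 (x - k)).1 + (pvDGet (pvDGet s.2 (x - k)).2 (x + k)).1 + 1)) 1000000007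
      = (pvCsum st x + (1 + pvCsum st (x - k) + pvCsum st (x + k))) % pvP := by
    rw [pvmod_eq, e1, e2, e6]
    have hm : ((pvCsum st x % pvP + (pvCsum st (x - k) % pvP + pvCsum st (x + k) % pvP + 1)) : Int)
        ≡ pvCsum st x + (pvCsum st (x - k) + pvCsum st (x + k) + 1) [ZMOD pvP] :=
      Int.ModEq.add (Int.emod_emod_of_dvd _ dvd_rfl)
        (Int.ModEq.add (Int.ModEq.add (Int.emod_emod_of_dvd _ dvd_rfl) (Int.emod_emod_of_dvd _ dvd_rfl))
          (Int.ModEq.refl 1))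
    have heq : (pvCsum st x + (pvCsum st (x - k) + pvCsum st (x + k) + 1) : Int)
        = pvCsum st x + (1 + pvCsum st (x - k) + pvCsum st (x + k)) := by ring
    rw [← heq]
    exact hm
  rw [pvSpecStep_eq]
  unfold pvRel
  refine ⟨?_, ?_, ?_, ?_⟩
  · intro v
    show ((pvDGet (pvDGet (pvDGet s.1 x).2 (x - k)).2 (x + k)).2.insert x
        (PySem.Int.mod ((pvDGet s.1 x).1 + (pvDGet (pvDGet s.1 x).2 (x - k)).1
          + (pvDGet (pvDGet (pvDGet s.1 x).2 (x - k)).2 (x + k)).1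
          + x * ((pvDGet s.2 (x - k)).1 + (pvDGet (pvDGet s.2 (x - k)).2 (x + k)).1 + 1))
          1000000007)).getD v 0 = _
    rw [PySem.Dict.getD_insert, pvGsum_append]
    by_cases hv : v = x
    · subst hv
      rw [if_pos rfl, if_pos rfl]
      exact hfv
    · rw [if_neg hv, if_neg (fun hx => hv hx.symm), add_zero, gDf v, h1 v]
  · intro v
    show ((pvDGet (pvDGet (pvDGet s.2 (x - k)).2 (x + k)).2 x).2.insert x
        (PySem.Int.mod ((pvDGet (pvDGet (pvDGet s.2 (x - k)).2 (x + k)).2 x).1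
          + ((pvDGet s.2 (x - k)).1 + (pvDGet (pvDGet s.2 (x - k)).2 (x + k)).1 + 1))
          1000000007)).getD v 0 = _
    rw [PySem.Dict.getD_insert, pvCsum_append]
    by_cases hv : v = x
    · subst hv
      rw [if_pos rfl, if_pos rfl]
      exact hcv
    · rw [if_neg hv, if_neg (fun hx => hv hx.symm), add_zero, gDc v, h2 v]
  · show ((pvDGet (pvDGet (pvDGet s.1 x).2 (x - k)).2 (x + k)).2.insert x
        (PySem.Int.mod ((pvDGet s.1 x).1 + (pvDGet (pvDGet s.1 x).2 (x - k)).1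
          + (pvDGet (pvDGet (pvDGet s.1 x).2 (x - k)).2 (x + k)).1
          + x * ((pvDGet s.2 (x - k)).1 + (pvDGet (pvDGet s.2 (x - k)).2 (x + k)).1 + 1))
          1000000007)).values.sum % pvP = _
    rw [pv_valsum_insert _ _ _ nD, vS, gDf x, h1 x, pvGtot_append, hfv]
    have hm : ((s.1.values.sum : Int) + (pvGsum st x + (pvGsum st (x - k) + pvGsum st (x + k)
          + x * (1 + pvCsum st (x - k) + pvCsum st (x + k)))) % pvP - pvGsum st x % pvP)
        ≡ pvGtot st + (pvGsum st x + (pvGsum st (x - k) + pvGsum st (x + k)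
          + x * (1 + pvCsum st (x - k) + pvCsum st (x + k)))) - pvGsum st x [ZMOD pvP] :=
      Int.ModEq.sub (Int.ModEq.add h3 (Int.emod_emod_of_dvd _ dvd_rfl)) (Int.emod_emod_of_dvd _ dvd_rfl)
    have heq : (pvGtot st + (pvGsum st x + (pvGsum st (x - k) + pvGsum st (x + k)
          + x * (1 + pvCsum st (x - k) + pvCsum st (x + k)))) - pvGsum st x : Int)
        = pvGtot st + (pvGsum st (x - k) + pvGsum st (x + k)
          + x * (1 + pvCsum st (x - k) + pvCsum st (x + k))) := by ring
    rw [← heq]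
    exact hm
  · exact PySem.Dict.nodup_keys_insert _ _ _ nD

theorem pvFoldA (k : Int) (nums : List Int) :
    ∀ (st : List (Int × Int × Int)) (s : PySem.Dict Int Int × PySem.Dict Int Int),
    pvRel st s → pvRel (nums.foldl (pvSpecStep k) st) (nums.foldl (pvStepA k) s) := by
  induction nums with
  | nil => intro st s h; exact h
  | cons x rest ih =>
    intro st s h
    rw [List.foldl_cons, List.foldl_cons]
    exact ih _ _ (pvStepA_rel k x st s h)

-- ===== VERDICT (by name: the statement is the Claim_ definition above) =====
theorem sum_of_subsequences_spec : Claim_equal_sum_of_subsequences := by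
  unfold Claim_equal_sum_of_subsequences
  intro nums k _
  unfold Spec_sum_of_subsequences sum_of_subsequences sum_of_subsequences_alt
  have hrel : pvRel [] (PySem.Dict.empty, PySem.Dict.empty) := by
    refine ⟨?_, ?_, ?_, ?_⟩
    · intro v; simp [pvGsum, PySem.Dict.getD_empty]
    · intro v; simp [pvCsum, PySem.Dict.getD_empty]
    · simp [pvGtot, PySem.Dict.values, PySem.Dict.empty]
    · simp [PySem.Dict.keys, PySem.Dict.empty]
  obtain ⟨_, _, h3, _⟩ := pvFoldA k nums [] _ hrel
  have HB : nums.foldl (pvStepB k) [] = (nums.foldl (pvSpecStep k) []).map pvRed := by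
    simpa using pvFoldB k nums []
  show PySem.Int.mod ((nums.foldl (pvStepA k) (PySem.Dict.empty, PySem.Dict.empty)).1.values.sum) 1000000007
      = PySem.Int.mod (((nums.foldl (pvStepB k) []).map (fun t => t.2.2)).sum) 1000000007
  rw [pvmod_eq, pvmod_eq, h3, HB, List.map_map]
  have hcomp : ((nums.foldl (pvSpecStep k) []).map ((fun t : Int × Int × Int => t.2.2) ∘ pvRed))
      = ((nums.foldl (pvSpecStep k) []).map (fun t => t.2.2)).map (fun a => a % pvP) := by
    rw [List.map_map]; rfl
  rw [hcomp, pv_summod]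
  rfl
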